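-- pv_equiv track=rewrite | github.com/ofdun/BMSTU-Programming | laba12/utils/actions.py | getMathString
-- ===== SOURCE A (Python) =====
-- def validateMathString(mathString: str) -> bool:
--     for i in range(1, len(mathString)):
--         substr = mathString[i - 1] + mathString[i]
--         if not(substr[0].isdigit() or substr[1].isdigit()):
--             if substr not in ("/+", "/-", "*-", "*+"):
--                 return False
--     return True
--
-- def getMathString(line: str, pointer: int) -> [str, bool]:
--     mathString = ""
--     defaultPointer = pointer
--     while pointer < len(line):
--         if line[pointer].isdigit() or line[pointer] in '+-/*':
--             if pointer != len(line) - 1 and line[pointer] in '+-/*' and not line[pointer + 1].isdigit():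
--                 pointer -= 1
--                 break
--             mathString += line[pointer]
--         else:
--             break
--         pointer += 1
--
--     valid = validateMathString(mathString)
--     if not valid:
--         return "", 0, False
--
--     return mathString, pointer - defaultPointer, True
-- ===== SOURCE B (Python) =====
-- def getMathString(line: str, pointer: int) -> [str, bool]:
--     # One pass: validation of adjacent pairs is done while scanning, so the
--     # separate validateMathString pass over the collected string disappears.
--     default = pointer
--     n = len(line)
--     chars = []
--     prev = None
--     while pointer < n:
--         c = line[pointer]
--         if not (c.isdigit() or c in '+-/*'):
--             break
--         if c in '+-/*' and pointer != n - 1 and not line[pointer + 1].isdigit():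
--             pointer -= 1
--             break
--         if prev is not None and not (prev.isdigit() or c.isdigit()):
--             if prev + c not in ("/+", "/-", "*-", "*+"):
--                 return "", 0, False
--         chars.append(c)
--         prev = c
--         pointer += 1
--     return "".join(chars), pointer - default, True
-- ===== Notes on version B (the rewrite author's own statement) =====
-- stated objective: alternative
-- what changed: B folds the pair validation into the scan itself (tracking the previously appended character and returning early on the first invalid pair), eliminating the validateMathString helper and its second pass over the collected string.
import Mathlib
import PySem

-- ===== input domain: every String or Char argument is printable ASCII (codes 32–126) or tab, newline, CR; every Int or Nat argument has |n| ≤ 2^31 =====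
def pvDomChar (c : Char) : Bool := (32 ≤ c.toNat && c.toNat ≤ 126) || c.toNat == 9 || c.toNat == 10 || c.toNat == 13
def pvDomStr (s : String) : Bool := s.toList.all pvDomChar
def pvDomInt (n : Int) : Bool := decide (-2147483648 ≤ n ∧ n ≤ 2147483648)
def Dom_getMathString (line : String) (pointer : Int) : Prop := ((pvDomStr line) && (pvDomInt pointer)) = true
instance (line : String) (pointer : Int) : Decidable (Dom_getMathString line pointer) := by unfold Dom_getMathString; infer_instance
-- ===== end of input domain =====

-- B merges the pair validation into the scan loop (tracking the last appended
-- character), removing A's separate validateMathString pass; same return value.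

-- ===== PORT A =====

-- 'c in "+-/*"'
def pvIsOp (c : Char) : Bool := c = '+' || c = '-' || c = '/' || c = '*'

-- substr in ("/+", "/-", "*-", "*+")
def pvPairListed (a b : Char) : Bool :=
  (a = '/' && b = '+') || (a = '/' && b = '-') || (a = '*' && b = '-') || (a = '*' && b = '+')

-- validateMathString: for i in range(1, len): look at each adjacent pair, in order
def validateMathString : List Char → Bool
  | a :: b :: rest =>
      if !(PySem.Chars.isdigit a || PySem.Chars.isdigit b) then
        if !pvPairListed a b then false else validateMathString (b :: rest)
      else validateMathString (b :: rest)
  | _ => true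

-- A's while loop; returns the final (mathString, pointer).  On an index where
-- Python would raise IndexError (pointer < -len, excluded by Pre_) it stops.
def loopA (cs : List Char) (pointer : Int) (ms : List Char) : List Char × Int :=
  if h : pointer < (cs.length : Int) then
    match PySem.List.pyGet? cs pointer with
    | none => (ms, pointer)  -- Python raises here; outside Pre_
    | some c =>
      if PySem.Chars.isdigit c || pvIsOp c then
        if pointer ≠ (cs.length : Int) - 1 ∧ pvIsOp c
            ∧ !(PySem.Chars.isdigit ((PySem.List.pyGet? cs (pointer + 1)).getD ' ')) then
          (ms, pointer - 1)
        else
          loopA cs (pointer + 1) (ms ++ [c])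
      else (ms, pointer)
  else (ms, pointer)
termination_by ((cs.length : Int) - pointer).toNat
decreasing_by omega

def getMathString (line : String) (pointer : Int) : String × Int × Bool :=
  let cs := line.toList
  let r := loopA cs pointer []
  if !validateMathString r.1 then ("", 0, false)
  else (String.mk r.1, r.2 - pointer, true)

-- ===== PORT B =====

-- B's single loop: carries the collected characters and the previously
-- appended character; 'none' result = early return ("", 0, False).
def loopB (cs : List Char) (pointer : Int) (chars : List Char) (prev : Option Char) :
    Option (List Char × Int) :=
  if h : pointer < (cs.length : Int) then
    match PySem.List.pyGet? cs pointer with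
    | none => some (chars, pointer)  -- Python raises here; outside Pre_
    | some c =>
      if !(PySem.Chars.isdigit c || pvIsOp c) then some (chars, pointer)
      else if pvIsOp c ∧ pointer ≠ (cs.length : Int) - 1
            ∧ !(PySem.Chars.isdigit ((PySem.List.pyGet? cs (pointer + 1)).getD ' ')) then
        some (chars, pointer - 1)
      else
        match prev with
        | some p =>
          if !(PySem.Chars.isdigit p || PySem.Chars.isdigit c) && !pvPairListed p c then
            none
          else loopB cs (pointer + 1) (chars ++ [c]) (some c)
        | none => loopB cs (pointer + 1) (chars ++ [c]) (some c)
  else some (chars, pointer)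
termination_by ((cs.length : Int) - pointer).toNat
decreasing_by all_goals omega

def getMathString_alt (line : String) (pointer : Int) : String × Int × Bool :=
  match loopB line.toList pointer [] none with
  | none => ("", 0, false)
  | some (chars, p) => (String.mk chars, p - pointer, true)

-- ===== PRECONDITION & SPEC =====
-- Pre_ excludes exactly the inputs where A raises IndexError: pointer < -len(line).
def Pre_getMathString (line : String) (pointer : Int) : Prop :=
  -(line.toList.length : Int) ≤ pointer
instance (line : String) (pointer : Int) : Decidable (Pre_getMathString line pointer) := by
  unfold Pre_getMathString; infer_instance
def pvWitness_getMathString : String × Int := ("1+2*x", 0)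

def Spec_getMathString (line : String) (pointer : Int) (out : String × Int × Bool) : Prop := out = getMathString_alt line pointer
instance (line : String) (pointer : Int) (out : String × Int × Bool) : Decidable (Spec_getMathString line pointer out) := by unfold Spec_getMathString; infer_instance

-- ===== CLAIM (what is proved, stated in full; the proofs are below) =====
def Claim_equal_getMathString : Prop := ∀ (line : String) (pointer : Int), Dom_getMathString line pointer → Pre_getMathString line pointer → Spec_getMathString line pointer (getMathString line pointer)

-- ===== LEMMAS AND PROOFS =====

theorem validateMathString_append_last {ms : List Char} {a c : Char}
    (h : ms.getLast? = some a) :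
    validateMathString (ms ++ [c]) =
      (validateMathString ms &&
        (PySem.Chars.isdigit a || PySem.Chars.isdigit c || pvPairListed a c)) := by
  induction ms with
  | nil => simp at h
  | cons x xs ih =>
    cases xs with
    | nil =>
      simp [List.getLast?] at h
      subst h
      by_cases h1 : PySem.Chars.isdigit x <;> by_cases h2 : PySem.Chars.isdigit c <;>
        simp [validateMathString, h1, h2]
    | cons y ys =>
      have h' : (y :: ys).getLast? = some a := by
        simpa [List.getLast?_cons_cons] using h
      have := ih h'
      simp only [List.cons_append, validateMathString] at *
      split_ifs <;> simp_all

theorem validateMathString_prefix {xs ys : List Char}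
    (h : validateMathString (xs ++ ys) = true) : validateMathString xs = true := by
  induction ys using List.reverseRecOn with
  | nil => simpa using h
  | append_singleton ys c ih =>
    apply ih
    rcases hxy : (xs ++ ys).getLast? with _ | a
    · obtain ⟨h1, h2⟩ := List.append_eq_nil_iff.mp (List.getLast?_eq_none_iff.mp hxy)
      subst h1; subst h2; simp [validateMathString]
    · rw [← List.append_assoc] at h
      rw [validateMathString_append_last hxy] at h
      simp only [Bool.and_eq_true] at h
      exact h.1

theorem loopA_prefix (cs : List Char) (pointer : Int) (ms : List Char) :
    ∃ t, (loopA cs pointer ms).1 = ms ++ t := by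
  induction pointer, ms using loopA.induct cs with
  | case1 p ms h hg => exact ⟨[], by rw [loopA]; simp [h, hg]⟩
  | case2 p ms h c hg hc hb =>
    exact ⟨[], by rw [loopA]; simp only [hg]; split_ifs <;> simp_all⟩
  | case3 p ms h c hg hc hb ih =>
    obtain ⟨t, ht⟩ := ih
    refine ⟨c :: t, ?_⟩
    rw [loopA]
    simp only [dif_pos h, hg, if_pos hc, if_neg hb]
    simpa using ht
  | case4 p ms h c hg hc => exact ⟨[], by rw [loopA]; simp only [hg]; split_ifs <;> simp_all⟩
  | case5 p ms h => exact ⟨[], by rw [loopA]; simp [h]⟩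

-- Main invariant: when the collected string so far is pair-valid and 'prev' is
-- its last character, B's merged loop computes A's loop result filtered by the
-- deferred validation.
theorem loopB_eq_loopA (cs : List Char) (pointer : Int) (ms : List Char)
    (hv : validateMathString ms = true) :
    loopB cs pointer ms ms.getLast? =
      (if validateMathString (loopA cs pointer ms).1 then some (loopA cs pointer ms)
       else none) := by
  induction pointer, ms using loopA.induct cs with
  | case1 p ms h hg =>
    rw [loopA, loopB]; simp [h, hg, hv]
  | case2 p ms h c hg hc hb =>
    have hb' : pvIsOp c ∧ p ≠ (cs.length : Int) - 1
        ∧ !(PySem.Chars.isdigit ((PySem.List.pyGet? cs (p + 1)).getD ' ')) :=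
      ⟨hb.2.1, hb.1, hb.2.2⟩
    have hA : loopA cs p ms = (ms, p - 1) := by
      rw [loopA]; simp only [dif_pos h, hg, if_pos hc, if_pos hb]
    have hB : loopB cs p ms ms.getLast? = some (ms, p - 1) := by
      rw [loopB]; simp only [dif_pos h, hg]
      rw [if_neg (by simp [hc]), if_pos hb']
    rw [hA, hB]
    simp [hv]
  | case3 p ms h c hg hc hb ih =>
    have hbB : ¬ (pvIsOp c ∧ p ≠ (cs.length : Int) - 1
        ∧ !(PySem.Chars.isdigit ((PySem.List.pyGet? cs (p + 1)).getD ' '))) := by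
      intro ⟨h1, h2, h3⟩; exact hb ⟨h2, h1, h3⟩
    have hlast : (ms ++ [c]).getLast? = some c := by simp
    rw [show loopA cs p ms = loopA cs (p + 1) (ms ++ [c]) by
      rw [loopA]; simp only [dif_pos h, hg, if_pos hc, if_neg hb]]
    rw [loopB]
    simp only [dif_pos h, hg]
    rw [if_neg (by simp [hc]), if_neg hbB]
    cases hms : ms.getLast? with
    | none =>
      have hnil : ms = [] := List.getLast?_eq_none_iff.mp hms
      subst hnil
      have := ih (by simp [validateMathString])
      rw [hlast] at this
      simpa using this
    | some a =>
      dsimp only []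
      by_cases hpair : (!(PySem.Chars.isdigit a || PySem.Chars.isdigit c)
          && !pvPairListed a c) = true
      · -- invalid adjacent pair: B returns none; A's final string keeps the bad pair
        have hbad : validateMathString (ms ++ [c]) = false := by
          rw [validateMathString_append_last hms, hv]
          revert hpair
          cases PySem.Chars.isdigit a <;> cases PySem.Chars.isdigit c <;>
            cases pvPairListed a c <;> simp
        obtain ⟨t, ht⟩ := loopA_prefix cs (p + 1) (ms ++ [c])
        have hbf : validateMathString (loopA cs (p + 1) (ms ++ [c])).1 = false := by
          rw [ht]
          by_contra hne
          have := validateMathString_prefix (xs := ms ++ [c]) (ys := t)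
            (by revert hne; cases validateMathString ((ms ++ [c]) ++ t) <;> simp)
          simp [hbad] at this
        rw [if_pos hpair]
        simp [hbf]
      · -- valid pair: recurse with the extended string
        have hvc : validateMathString (ms ++ [c]) = true := by
          rw [validateMathString_append_last hms, hv]
          revert hpair
          cases PySem.Chars.isdigit a <;> cases PySem.Chars.isdigit c <;>
            cases pvPairListed a c <;> simp
        have := ih hvc
        rw [hlast] at this
        rw [if_neg hpair]
        exact this
  | case4 p ms h c hg hc =>
    have hc' : (PySem.Chars.isdigit c || pvIsOp c) = false := by
      revert hc; cases (PySem.Chars.isdigit c || pvIsOp c) <;> simp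
    rw [loopA, loopB]; simp [dif_pos h, hg, hc', hv]
  | case5 p ms h =>
    rw [loopA, loopB]; simp [h, hv]

-- ===== VERDICT (by name: the statement is the Claim_ definition above) =====
theorem getMathString_spec : Claim_equal_getMathString := by
  intro line pointer _ _
  unfold Spec_getMathString getMathString getMathString_alt
  have h := loopB_eq_loopA line.toList pointer [] (by simp [validateMathString])
  simp only [List.getLast?_nil] at h
  rw [h]
  by_cases hv : validateMathString (loopA line.toList pointer []).1 = true
  · simp [hv]
  · simp only [Bool.not_eq_true] at hv
    simp [hv]
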